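-- pv_equiv track=rewrite | github.com/Quig-Enterprises/groundtruth-studio | app/cross_camera_matcher.py | are_classes_compatible
-- ===== SOURCE A (Python) =====
-- COMPATIBLE_VEHICLE_CLASSES = [
--     {'ATV', 'UTV', 'pickup truck', 'SUV'},  # Off-road / utility vehicles often confused
--     {'sedan', 'SUV', 'car'},                  # Passenger vehicles
--     {'box truck', 'delivery truck', 'truck'}, # Commercial vehicles
-- ]
--
-- def are_classes_compatible(cls_a, cls_b):
--     """Check if two vehicle classes are in the same compatibility group.
--
--     Returns:
--         True if classes are in the same group (compatible mismatch),
--         False if classes are in different groups (true conflict),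
--         None if either class is None.
--     """
--     if cls_a is None or cls_b is None:
--         return None
--     if cls_a == cls_b:
--         return True
--     for group in COMPATIBLE_VEHICLE_CLASSES:
--         if cls_a in group and cls_b in group:
--             return True
--     return False
-- ===== SOURCE B (Python) =====
-- COMPATIBLE_VEHICLE_CLASSES = [
--     {'ATV', 'UTV', 'pickup truck', 'SUV'},  # Off-road / utility vehicles often confused
--     {'sedan', 'SUV', 'car'},                  # Passenger vehicles
--     {'box truck', 'delivery truck', 'truck'}, # Commercial vehicles
-- ]
--
-- # Inverted index built once at module load: class name -> set of group ids.
-- _CLASS_GROUP_INDEX = {}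
-- for _i, _group in enumerate(COMPATIBLE_VEHICLE_CLASSES):
--     for _name in _group:
--         _CLASS_GROUP_INDEX.setdefault(_name, set()).add(_i)
--
-- _EMPTY = frozenset()
--
-- def are_classes_compatible(cls_a, cls_b):
--     """Check if two vehicle classes are in the same compatibility group."""
--     if cls_a is None or cls_b is None:
--         return None
--     if cls_a == cls_b:
--         return True
--     return bool(_CLASS_GROUP_INDEX.get(cls_a, _EMPTY) & _CLASS_GROUP_INDEX.get(cls_b, _EMPTY))
-- ===== Notes on version B (the rewrite author's own statement) =====
-- stated objective: idiomatic
-- what changed: Replaces the per-call scan over every compatibility group with an inverted index (class name -> set of group ids) built once at module load; the compatibility test becomes two lookups and a set intersection.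
import Mathlib
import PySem

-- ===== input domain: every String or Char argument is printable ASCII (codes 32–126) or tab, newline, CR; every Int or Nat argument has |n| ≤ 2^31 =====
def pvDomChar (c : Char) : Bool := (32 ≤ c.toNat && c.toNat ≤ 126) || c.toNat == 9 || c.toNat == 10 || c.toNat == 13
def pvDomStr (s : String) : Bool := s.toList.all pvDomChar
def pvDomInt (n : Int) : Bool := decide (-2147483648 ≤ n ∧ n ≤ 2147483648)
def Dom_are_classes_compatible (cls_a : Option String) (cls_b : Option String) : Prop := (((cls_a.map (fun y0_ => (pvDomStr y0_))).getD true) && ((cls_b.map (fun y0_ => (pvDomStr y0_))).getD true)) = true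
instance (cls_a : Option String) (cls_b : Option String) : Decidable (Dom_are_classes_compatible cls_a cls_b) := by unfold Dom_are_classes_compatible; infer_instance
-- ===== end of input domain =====

-- B replaces A's per-call scan over all compatibility groups with an inverted index
-- (class name -> set of group ids) built once, so the test is two lookups + a set intersection (objective: idiomatic).

-- ===== PORT A =====
def pvGroupsA : List (PySem.Set String) :=
  [PySem.Set.ofList ["ATV", "UTV", "pickup truck", "SUV"],
   PySem.Set.ofList ["sedan", "SUV", "car"],
   PySem.Set.ofList ["box truck", "delivery truck", "truck"]]

def pvLoopA (x y : String) : List (PySem.Set String) → Bool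
  | [] => false
  | g :: rest => if g.contains x && g.contains y then true else pvLoopA x y rest

def are_classes_compatible (cls_a : Option String) (cls_b : Option String) : Option Bool :=
  match cls_a, cls_b with
  | none, _ => none
  | _, none => none
  | some x, some y =>
    if x == y then some true
    else some (pvLoopA x y pvGroupsA)

-- ===== PORT B =====
-- (B reads the same module constant COMPATIBLE_VEHICLE_CLASSES = pvGroupsA)
-- _CLASS_GROUP_INDEX: built once by the module-level loop
-- (setdefault(name, set()).add(i)  =  d[name] = d.get(name, set()) ∪ {i}  =  Dict.modify).
def pvIndexB : PySem.Dict String (PySem.Set Int) :=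
  (PySem.List.enumerate pvGroupsA).foldl
    (fun d p => p.2.foldl (fun d name => d.modify name PySem.Set.empty (fun s => PySem.Set.add s p.1)) d)
    PySem.Dict.empty

def are_classes_compatible_alt (cls_a : Option String) (cls_b : Option String) : Option Bool :=
  match cls_a, cls_b with
  | none, _ => none
  | _, none => none
  | some x, some y =>
    if x == y then some true
    else
      -- bool(s & t) for sets = the intersection is nonempty
      some (!(PySem.Set.inter (pvIndexB.getD x PySem.Set.empty) (pvIndexB.getD y PySem.Set.empty)).isEmpty)

-- ===== PRECONDITION & SPEC =====
def Spec_are_classes_compatible (cls_a : Option String) (cls_b : Option String) (out : Option Bool) : Prop := out = are_classes_compatible_alt cls_a cls_b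
instance (cls_a : Option String) (cls_b : Option String) (out : Option Bool) : Decidable (Spec_are_classes_compatible cls_a cls_b out) := by unfold Spec_are_classes_compatible; infer_instance

-- ===== CLAIM (what is proved, stated in full; the proofs are below) =====
def Claim_equal_are_classes_compatible : Prop := ∀ (cls_a : Option String) (cls_b : Option String), Dom_are_classes_compatible cls_a cls_b → Spec_are_classes_compatible cls_a cls_b (are_classes_compatible cls_a cls_b)

-- ===== LEMMAS AND PROOFS =====

-- the index, evaluated: literal association list
lemma pvIndexB_eq : pvIndexB = PySem.Dict.mk
    [("ATV", [0]), ("UTV", [0]), ("pickup truck", [0]), ("SUV", [0, 1]),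
     ("sedan", [1]), ("car", [1]),
     ("box truck", [2]), ("delivery truck", [2]), ("truck", [2])] := by
  decide

lemma getD_pvIndexB (s : String) : pvIndexB.getD s PySem.Set.empty =
    if s = "ATV" then [0] else if s = "UTV" then [0]
    else if s = "pickup truck" then [0] else if s = "SUV" then [0, 1]
    else if s = "sedan" then [1] else if s = "car" then [1]
    else if s = "box truck" then [2] else if s = "delivery truck" then [2]
    else if s = "truck" then [2] else [] := by
  rw [pvIndexB_eq]
  simp only [PySem.Dict.getD, PySem.Dict.get?, List.find?_cons, List.find?_nil, PySem.Set.empty]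
  by_cases h0 : s = "ATV"
  case pos => subst h0; decide
  by_cases h1 : s = "UTV"
  case pos => subst h1; decide
  by_cases h2 : s = "pickup truck"
  case pos => subst h2; decide
  by_cases h3 : s = "SUV"
  case pos => subst h3; decide
  by_cases h4 : s = "sedan"
  case pos => subst h4; decide
  by_cases h5 : s = "car"
  case pos => subst h5; decide
  by_cases h6 : s = "box truck"
  case pos => subst h6; decide
  by_cases h7 : s = "delivery truck"
  case pos => subst h7; decide
  by_cases h8 : s = "truck"
  case pos => subst h8; decide
  simp only [show ("ATV" == s) = false from beq_eq_false_iff_ne.mpr (Ne.symm h0), show ("UTV" == s) = false from beq_eq_false_iff_ne.mpr (Ne.symm h1), show ("pickup truck" == s) = false from beq_eq_false_iff_ne.mpr (Ne.symm h2), show ("SUV" == s) = false from beq_eq_false_iff_ne.mpr (Ne.symm h3), show ("sedan" == s) = false from beq_eq_false_iff_ne.mpr (Ne.symm h4), show ("car" == s) = false from beq_eq_false_iff_ne.mpr (Ne.symm h5), show ("box truck" == s) = false from beq_eq_false_iff_ne.mpr (Ne.symm h6), show ("delivery truck" == s) = false from beq_eq_false_iff_ne.mpr (Ne.symm h7), show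 ("truck" == s) = false from beq_eq_false_iff_ne.mpr (Ne.symm h8)]
  simp [h0, h1, h2, h3, h4, h5, h6, h7, h8]

lemma mem_pvIndexB (s : String) (i : Int) : i ∈ pvIndexB.getD s PySem.Set.empty ↔
    (i = 0 ∧ s ∈ ["ATV", "UTV", "pickup truck", "SUV"]) ∨
    (i = 1 ∧ s ∈ ["sedan", "SUV", "car"]) ∨
    (i = 2 ∧ s ∈ ["box truck", "delivery truck", "truck"]) := by
  rw [getD_pvIndexB]
  split_ifs <;> subst_vars <;> simp_all

lemma loopA_iff (x y : String) (gs : List (PySem.Set String)) :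
    pvLoopA x y gs = true ↔ ∃ g ∈ gs, x ∈ g ∧ y ∈ g := by
  induction gs with
  | nil => simp [pvLoopA]
  | cons g rest ih =>
      simp only [pvLoopA]
      split_ifs with h
      · simp_all
      · simp only [Bool.and_eq_true, PySem.Set.contains_iff] at h
        simp [ih]
        tauto

lemma pv_key (x y : String) :
    pvLoopA x y pvGroupsA =
      !(PySem.Set.inter (pvIndexB.getD x PySem.Set.empty) (pvIndexB.getD y PySem.Set.empty)).isEmpty := by
  rw [Bool.eq_iff_iff, loopA_iff]
  have hne : ∀ (l : List Int), l ≠ [] ↔ ∃ x, x ∈ l := fun l => by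
    simp [List.eq_nil_iff_forall_not_mem]
  rw [Bool.not_eq_true', List.isEmpty_eq_false_iff, hne]
  simp only [PySem.Set.mem_inter, mem_pvIndexB, pvGroupsA, List.mem_cons, List.mem_nil_iff]
  constructor
  · rintro ⟨g, hg, hx, hy⟩
    rcases hg with rfl | rfl | rfl | h
    · exact ⟨0, Or.inl ⟨rfl, by simpa using hx⟩, Or.inl ⟨rfl, by simpa using hy⟩⟩
    · exact ⟨1, Or.inr (Or.inl ⟨rfl, by simpa using hx⟩), Or.inr (Or.inl ⟨rfl, by simpa using hy⟩)⟩
    · exact ⟨2, Or.inr (Or.inr ⟨rfl, by simpa using hx⟩), Or.inr (Or.inr ⟨rfl, by simpa using hy⟩)⟩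
    · cases h
  · rintro ⟨i, hx, hy⟩
    rcases hx with ⟨rfl, hx⟩ | ⟨rfl, hx⟩ | ⟨rfl, hx⟩ <;>
      rcases hy with ⟨hi, hy⟩ | ⟨hi, hy⟩ | ⟨hi, hy⟩ <;> first
        | exact ⟨_, Or.inl rfl, by simpa using hx, by simpa using hy⟩
        | exact ⟨_, Or.inr (Or.inl rfl), by simpa using hx, by simpa using hy⟩
        | exact ⟨_, Or.inr (Or.inr (Or.inl rfl)), by simpa using hx, by simpa using hy⟩
        | omega

-- ===== VERDICT (by name: the statement is the Claim_ definition above) =====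
theorem are_classes_compatible_spec : Claim_equal_are_classes_compatible := by
  intro cls_a cls_b _
  unfold Spec_are_classes_compatible are_classes_compatible are_classes_compatible_alt
  match cls_a, cls_b with
  | none, _ => rfl
  | some _, none => rfl
  | some x, some y =>
    simp only
    split_ifs with h
    · rfl
    · rw [pv_key]
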